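-- pv_equiv track=rewrite | github.com/dell-examples/generative-ai | transportation-maritime/maritime_solution/ai_services/video_pipeline/pipeline/runner.py | divide_dict
-- ===== SOURCE A (Python) =====
-- def divide_dict(dictionary, n):
--     """
--     Divide a dictionary into approximately equal-sized divisions.
--
--     Args:
--         dictionary (dict): The dictionary to be divided.
--         n (int): The number of divisions to create.
--
--     Returns:
--         tuple: A tuple containing:
--             - divisions (list): A list of dictionaries representing the divisions.
--             - divisions_sizes (list): A list containing the number of items in each division.
--     """
--     items = list(dictionary.items())
--     total_items = len(items)
--
--     # Calculate the number of items in each division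
--     items_per_division = total_items // n
--     remainder = total_items % n
--
--     divisions = []
--     divisons_sizes = []
--     start_index = 0
--
--     # Create divisions
--     for i in range(n):
--         division_size = items_per_division + (1 if i < remainder else 0)
--         divisons_sizes.append(division_size)
--         divisions.append(dict(items[start_index:start_index + division_size]))
--         start_index += division_size
--
--     return divisions, divisons_sizes
-- ===== SOURCE B (Python) =====
-- def divide_dict(dictionary, n):
--     """Partition a dictionary into n contiguous near-equal divisions.
--
--     Single pass over the items: each item's target division is computed in
--     closed form from its position, instead of slicing per division with a
--     running start index.
--     """
--     items = list(dictionary.items())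
--     q, r = divmod(len(items), n)
--     sizes = [q + 1] * r + [q] * (n - r)
--     divisions = [{} for _ in range(n)]
--     hi = r * (q + 1)  # first hi items land in the r larger divisions
--     for m, (k, v) in enumerate(items):
--         j = m // (q + 1) if m < hi else r + (m - hi) // q
--         divisions[j][k] = v
--     return divisions, sizes
-- ===== Notes on version B (the rewrite author's own statement) =====
-- stated objective: alternative
-- what changed: Instead of looping over the n divisions with a running start index and slicing the item list per division, B builds the size list in closed form and makes a single pass over the items, computing each item's target division directly from its position.
-- outside the precondition, e.g. on divide_dict({'a': 'x'}, -1): A returns ([], []), B raises IndexError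
import Mathlib
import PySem

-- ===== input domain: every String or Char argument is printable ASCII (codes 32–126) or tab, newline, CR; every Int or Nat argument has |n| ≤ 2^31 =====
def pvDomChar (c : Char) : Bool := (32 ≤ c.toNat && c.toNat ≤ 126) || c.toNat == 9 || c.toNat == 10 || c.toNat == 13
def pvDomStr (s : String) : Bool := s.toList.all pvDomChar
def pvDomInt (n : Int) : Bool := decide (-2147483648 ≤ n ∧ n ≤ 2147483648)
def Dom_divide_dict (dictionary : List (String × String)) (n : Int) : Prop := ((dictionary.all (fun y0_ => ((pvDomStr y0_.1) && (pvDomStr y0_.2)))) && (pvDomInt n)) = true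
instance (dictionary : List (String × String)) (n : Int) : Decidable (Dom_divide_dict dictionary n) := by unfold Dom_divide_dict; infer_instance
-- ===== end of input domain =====

-- B replaces A's loop over the n divisions (running start index + one slice per
-- division) by a closed-form size list and a single pass over the items, computing
-- each item's target division directly from its position (objective: alternative).

-- ===== PORT A =====
def divide_dict (dictionary : List (String × String)) (n : Int) : (List (List (String × String))) × List Int :=
  let items := (PySem.Dict.ofList dictionary).items
  let total : Int := (items.length : Int)
  let items_per_division := PySem.Int.floordiv total n
  let remainder := PySem.Int.mod total n
  -- for i in range(n): append division_size, append dict(items[start:start+size]), advance start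
  let res := (PySem.List.pyRange 0 n 1).foldl
    (fun (st : List (List (String × String)) × List Int × Int) i =>
      let division_size := items_per_division + (if i < remainder then (1 : Int) else 0)
      (st.1 ++ [(PySem.Dict.ofList (PySem.List.slice items (some st.2.2) (some (st.2.2 + division_size)))).items],
       st.2.1 ++ [division_size],
       st.2.2 + division_size))
    ([], [], 0)
  (res.1, res.2.1)

-- ===== PORT B =====
def divide_dict_alt (dictionary : List (String × String)) (n : Int) : (List (List (String × String))) × List Int :=
  let items := (PySem.Dict.ofList dictionary).items
  match PySem.Int.divmod? (items.length : Int) n with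
  | none => ([], [])  -- n = 0: divmod raises ZeroDivisionError (outside Pre_)
  | some (q, r) =>
    let sizes := List.replicate r.toNat (q + 1) ++ List.replicate (n - r).toNat q
    let hi := r * (q + 1)
    let divisions := (PySem.List.enumerate items).foldl
      (fun divs p =>
        let j := if p.1 < hi then PySem.Int.floordiv p.1 (q + 1)
                 else r + PySem.Int.floordiv (p.1 - hi) q
        -- divisions[j][k] = v : exact for 0 ≤ j < n, which holds under Pre_
        divs.modify j.toNat (fun d => d.insert p.2.1 p.2.2))
      (List.replicate n.toNat PySem.Dict.empty)
    (divisions.map PySem.Dict.items, sizes)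

-- ===== PRECONDITION & SPEC =====
-- Pre_ excludes n ≤ 0: at n = 0 both programs raise ZeroDivisionError; for n < 0
-- (not a meaningful division count) A's ([], []) — silently discarding every item
-- because range(n) is empty — is an artefact, and B's single pass raises IndexError
-- there when the dictionary is non-empty.
def Pre_divide_dict (dictionary : List (String × String)) (n : Int) : Prop := 1 ≤ n
instance (dictionary : List (String × String)) (n : Int) : Decidable (Pre_divide_dict dictionary n) := by unfold Pre_divide_dict; infer_instance
def pvWitness_divide_dict : (List (String × String)) × Int := ([("a", "1"), ("b", "2"), ("c", "3")], 2)

def Spec_divide_dict (dictionary : List (String × String)) (n : Int) (out : (List (List (String × String))) × List Int) : Prop := out = divide_dict_alt dictionary n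
instance (dictionary : List (String × String)) (n : Int) (out : (List (List (String × String))) × List Int) : Decidable (Spec_divide_dict dictionary n out) := by unfold Spec_divide_dict; infer_instance

-- ===== CLAIM (what is proved, stated in full; the proofs are below) =====
def Claim_equal_divide_dict : Prop := ∀ (dictionary : List (String × String)) (n : Int), Dom_divide_dict dictionary n → Pre_divide_dict dictionary n → Spec_divide_dict dictionary n (divide_dict dictionary n)

-- ===== LEMMAS AND PROOFS =====

def pvOff (q r i : Nat) : Nat := i * q + min i r
def pvSize (q r i : Nat) : Nat := q + (if i < r then 1 else 0)
def pvChunk (items : List (String × String)) (q r i : Nat) : List (String × String) :=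
  (items.drop (pvOff q r i)).take (pvSize q r i)
lemma pvOff_succ (q r i : Nat) : pvOff q r (i + 1) = pvOff q r i + pvSize q r i := by
  simp only [pvOff, pvSize, Nat.succ_mul, Nat.min_def]; split_ifs <;> omega

lemma pvOff_mono (q r : Nat) {i j : Nat} (h : i ≤ j) : pvOff q r i ≤ pvOff q r j := by
  unfold pvOff
  have h1 : i * q ≤ j * q := Nat.mul_le_mul_right q h
  have h2 : min i r ≤ min j r := by omega
  omega

lemma A_fold (items : List (String × String)) (q r : Nat) (m : Nat) :
    (PySem.List.pyRange 0 (m : Int) 1).foldl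
      (fun (st : List (List (String × String)) × List Int × Int) i =>
        ((st.1 ++ [(PySem.Dict.ofList (PySem.List.slice items (some st.2.2)
            (some (st.2.2 + ((q : Int) + (if i < (r : Int) then (1 : Int) else 0)))))).items],
          st.2.1 ++ [(q : Int) + (if i < (r : Int) then 1 else 0)],
          st.2.2 + ((q : Int) + (if i < (r : Int) then 1 else 0)))))
      ([], [], 0)
    = ((List.range m).map (fun i => (PySem.Dict.ofList (pvChunk items q r i)).items),
       (List.range m).map (fun i => ((pvSize q r i : Nat) : Int)),
       ((pvOff q r m : Nat) : Int)) := by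
  induction m with
  | zero => simp [PySem.List.pyRange_one_eq_nil (by omega : (0:Int) ≤ 0), pvOff]
  | succ m ih =>
    have hcast : ((m + 1 : Nat) : Int) = (m : Int) + 1 := by push_cast; ring
    rw [hcast, PySem.List.pyRange_one_succ_right (by positivity), List.foldl_append, ih]
    have hsz : (q : Int) + (if (m : Int) < (r : Int) then (1:Int) else 0) = ((pvSize q r m : Nat) : Int) := by
      simp only [pvSize, Nat.cast_lt]; split_ifs <;> push_cast <;> ring
    simp only [List.foldl_cons, List.foldl_nil, hsz]
    rw [PySem.List.slice_natCast_add]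
    rw [show ((pvOff q r m : Nat) : Int) + ((pvSize q r m : Nat) : Int) = (((pvOff q r m + pvSize q r m : Nat)) : Int) by push_cast; ring]
    refine Prod.ext ?_ (Prod.ext ?_ ?_) <;> simp [List.range_succ, pvChunk, pvOff_succ]
lemma modify_modify {β : Type} (bs : List β) (t : Nat) (f g : β → β) :
    (bs.modify t f).modify t g = bs.modify t (fun d => g (f d)) := by
  apply List.ext_getElem (by simp)
  intro j h1 h2
  simp only [List.getElem_modify]
  split_ifs <;> rfl

lemma foldl_modify_const {α β : Type} (l : List α) (t : Nat) (g : α → β → β) (bs : List β) :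
    l.foldl (fun bs a => bs.modify t (g a)) bs
      = bs.modify t (fun d => l.foldl (fun d a => g a d) d) := by
  induction l generalizing bs with
  | nil =>
    simp only [List.foldl_nil]
    apply List.ext_getElem (by simp)
    intro j h1 h2
    simp only [List.getElem_modify]
    split_ifs <;> rfl
  | cons a l ih => simp only [List.foldl_cons]; rw [ih, modify_modify]

lemma enum_fold_insert (c : List (String × String)) (s : Int) (d : PySem.Dict String String) :
    (PySem.List.enumerate c s).foldl (fun d p => d.insert p.2.1 p.2.2) d
      = c.foldl (fun d p => d.insert p.1 p.2) d := by
  induction c generalizing s d with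
  | nil => rfl
  | cons p c ih => simp only [PySem.List.enumerate_cons, List.foldl_cons, ih]

lemma target_eq (q r N i m : Nat) (hr : r < N) (hi : i < N)
    (h1 : i * q + min i r ≤ m) (h2 : m < i * q + min i r + (q + (if i < r then 1 else 0))) :
    (if m < r * (q + 1) then m / (q + 1) else r + (m - r * (q + 1)) / q) = i := by
  split_ifs with hm
  · have hir : i < r := by
      by_contra h
      push_neg at h
      rw [min_eq_right h] at h1
      have hp : r * q ≤ i * q := Nat.mul_le_mul_right q h
      nlinarith [h1, hm]
    rw [min_eq_left (le_of_lt hir)] at h1 h2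
    rw [if_pos hir] at h2
    have e1 : i * (q + 1) ≤ m := by nlinarith
    have e2 : m < (i + 1) * (q + 1) := by nlinarith
    exact Nat.div_eq_of_lt_le e1 e2
  · push_neg at hm
    have hir : r ≤ i := by
      by_contra h
      push_neg at h
      rw [min_eq_left (le_of_lt h), if_pos h] at h2
      have hp : (i + 1) * (q + 1) ≤ r * (q + 1) := Nat.mul_le_mul_right (q + 1) (by omega)
      nlinarith [h2, hm]
    rw [min_eq_right hir] at h1 h2
    rw [if_neg (by omega : ¬ i < r)] at h2
    obtain ⟨d, hd⟩ : ∃ d, i = r + d := ⟨i - r, by omega⟩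
    subst hd
    have key1 : d * q + r * (q + 1) ≤ m := by nlinarith
    have key2 : m < (d + 1) * q + r * (q + 1) := by nlinarith
    have e1 : d * q ≤ m - r * (q + 1) := Nat.le_sub_of_add_le key1
    have e2 : m - r * (q + 1) < (d + 1) * q := by
      rw [Nat.sub_lt_iff_lt_add (by nlinarith : r * (q + 1) ≤ m)]
      exact key2
    rw [Nat.div_eq_of_lt_le e1 e2]

lemma B_fold (items : List (String × String)) (q r N : Nat)
    (hT : items.length = N * q + r) (hr : r < N) :
    ∀ i, i ≤ N →
    (PySem.List.enumerate (items.drop (pvOff q r i)) ((pvOff q r i : Nat) : Int)).foldl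
      (fun divs p =>
        (divs.modify (if p.1 < (r : Int) * ((q : Int) + 1)
            then PySem.Int.floordiv p.1 ((q : Int) + 1)
            else (r : Int) + PySem.Int.floordiv (p.1 - (r : Int) * ((q : Int) + 1)) (q : Int)).toNat
          (fun d => d.insert p.2.1 p.2.2)))
      ((List.range N).map (fun t => if t < i then PySem.Dict.ofList (pvChunk items q r t) else PySem.Dict.empty))
    = (List.range N).map (fun t => PySem.Dict.ofList (pvChunk items q r t)) := by
  suffices H : ∀ k i, i ≤ N → N - i = k →
      (PySem.List.enumerate (items.drop (pvOff q r i)) ((pvOff q r i : Nat) : Int)).foldl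
        (fun divs p =>
          (divs.modify (if p.1 < (r : Int) * ((q : Int) + 1)
              then PySem.Int.floordiv p.1 ((q : Int) + 1)
              else (r : Int) + PySem.Int.floordiv (p.1 - (r : Int) * ((q : Int) + 1)) (q : Int)).toNat
            (fun d => d.insert p.2.1 p.2.2)))
        ((List.range N).map (fun t => if t < i then PySem.Dict.ofList (pvChunk items q r t) else PySem.Dict.empty))
      = (List.range N).map (fun t => PySem.Dict.ofList (pvChunk items q r t)) by
    intro i hi; exact H (N - i) i hi rfl
  intro k
  induction k with
  | zero =>
    intro i hi hk
    have hiN : i = N := by omega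
    subst hiN
    have hoff : pvOff q r i = items.length := by
      simp only [pvOff, hT]
      omega
    rw [hoff, List.drop_length]
    simp only [PySem.List.enumerate_nil, List.foldl_nil]
    apply List.map_congr_left
    intro t ht
    rw [if_pos (List.mem_range.mp ht)]
  | succ k ih =>
    intro i hi hk
    have hilt : i < N := by omega
    -- split off the current chunk
    have hoffle : pvOff q r (i + 1) ≤ items.length := by
      have h1 : pvOff q r (i + 1) ≤ pvOff q r N := pvOff_mono q r (by omega)
      have h2 : pvOff q r N = items.length := by
        simp only [pvOff, hT, min_eq_right (le_of_lt hr)]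
      omega
    have hlen : (pvChunk items q r i).length = pvSize q r i := by
      have := pvOff_succ q r i
      simp only [pvChunk, List.length_take, List.length_drop]
      omega
    have hsplit : items.drop (pvOff q r i)
        = pvChunk items q r i ++ items.drop (pvOff q r (i + 1)) := by
      simp only [pvChunk, pvOff_succ, ← List.drop_drop]
      rw [Nat.add_comm] at *
      exact (List.take_append_drop _ _).symm
    rw [hsplit, PySem.List.enumerate_append, List.foldl_append, hlen]
    have hfun : ∀ (acc : List (PySem.Dict String String)),
        ∀ p ∈ PySem.List.enumerate (pvChunk items q r i) ((pvOff q r i : Nat) : Int),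
        (acc.modify (if p.1 < (r : Int) * ((q : Int) + 1)
            then PySem.Int.floordiv p.1 ((q : Int) + 1)
            else (r : Int) + PySem.Int.floordiv (p.1 - (r : Int) * ((q : Int) + 1)) (q : Int)).toNat
          (fun d => d.insert p.2.1 p.2.2))
        = acc.modify i (fun d => d.insert p.2.1 p.2.2) := by
      intro acc p hp
      rw [PySem.List.mem_enumerate_iff] at hp
      obtain ⟨kk, hkk, hpeq⟩ := hp
      subst hpeq
      dsimp only
      rw [hlen] at hkk
      have hm1 : pvOff q r i ≤ pvOff q r i + kk := by omega
      have hm2 : pvOff q r i + kk < pvOff q r i + pvSize q r i := by omega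
      have htgt := target_eq q r N i (pvOff q r i + kk) hr hilt hm1 hm2
      have hcast : ((pvOff q r i : Nat) : Int) + (kk : Int) = ((pvOff q r i + kk : Nat) : Int) := by push_cast; ring
      rw [hcast, show ((r : Int) * ((q : Int) + 1)) = ((r * (q + 1) : Nat) : Int) by push_cast; ring]
      congr 1
      set m := pvOff q r i + kk with hm
      by_cases hcond : m < r * (q + 1)
      · rw [if_pos (by exact_mod_cast hcond)]
        rw [show ((q : Int) + 1) = ((q + 1 : Nat) : Int) by push_cast; ring,
            PySem.Int.floordiv_natCast]
        rw [if_pos hcond] at htgt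
        simp [htgt]
      · rw [if_neg (by exact_mod_cast hcond)]
        rw [show (m : Int) - ((r * (q + 1) : Nat) : Int) = ((m - r * (q + 1) : Nat) : Int) by omega]
        rw [PySem.Int.floordiv_natCast]
        rw [if_neg (by omega)] at htgt
        rw [show ((r : Int) + ((m - r * (q + 1)) / q : Nat)) = (((r + (m - r * (q + 1)) / q : Nat)) : Int) by push_cast; ring]
        simp [htgt]
    have hstep :
        ((List.range N).map (fun t => if t < i then PySem.Dict.ofList (pvChunk items q r t) else PySem.Dict.empty)).modify i
          (fun d => (pvChunk items q r i).foldl (fun d p => d.insert p.1 p.2) d)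
        = (List.range N).map (fun t => if t < i + 1 then PySem.Dict.ofList (pvChunk items q r t) else PySem.Dict.empty) := by
      apply List.ext_getElem (by simp)
      intro j h1 h2
      simp only [List.getElem_modify, List.getElem_map, List.getElem_range]
      by_cases hij : i = j
      · subst hij
        rw [if_pos rfl, if_neg (lt_irrefl i), if_pos (by omega)]
        rfl
      · rw [if_neg hij]
        have hiff : j < i ↔ j < i + 1 := by omega
        simp only [hiff]
    have hinner :
        (PySem.List.enumerate (pvChunk items q r i) ((pvOff q r i : Nat) : Int)).foldl
          (fun divs p =>
            (divs.modify (if p.1 < (r : Int) * ((q : Int) + 1)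
                then PySem.Int.floordiv p.1 ((q : Int) + 1)
                else (r : Int) + PySem.Int.floordiv (p.1 - (r : Int) * ((q : Int) + 1)) (q : Int)).toNat
              (fun d => d.insert p.2.1 p.2.2)))
          ((List.range N).map (fun t => if t < i then PySem.Dict.ofList (pvChunk items q r t) else PySem.Dict.empty))
        = (List.range N).map (fun t => if t < i + 1 then PySem.Dict.ofList (pvChunk items q r t) else PySem.Dict.empty) := by
      rw [PySem.List.foldl_congr_mem _ _ (fun divs p => divs.modify i (fun d => d.insert p.2.1 p.2.2)) _ hfun]
      rw [foldl_modify_const]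
      simp only [enum_fold_insert]
      exact hstep
    rw [hinner]
    rw [show ((pvOff q r i : Nat) : Int) + ((pvSize q r i : Nat) : Int)
          = ((pvOff q r (i + 1) : Nat) : Int) by rw [pvOff_succ]; push_cast; ring]
    exact ih (i + 1) (by omega) (by omega)

lemma sizes_eq (q r N : Nat) (hr : r ≤ N) :
    (List.range N).map (fun i => ((pvSize q r i : Nat) : Int))
      = List.replicate r ((q : Int) + 1) ++ List.replicate (N - r) (q : Int) := by
  apply List.ext_getElem (by simp; omega)
  intro j h1 h2
  rcases Nat.lt_or_ge j r with hj | hj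
  · rw [List.getElem_append_left (by simpa using hj)]
    simp [pvSize, hj]
  · rw [List.getElem_append_right (by simpa using hj)]
    simp only [List.getElem_map, List.getElem_range, List.getElem_replicate, pvSize]
    rw [if_neg (by omega)]
    simp


lemma divide_dict_eq_alt (dictionary : List (String × String)) (n : Int) (hn : 1 ≤ n) :
    divide_dict dictionary n = divide_dict_alt dictionary n := by
  obtain ⟨N, rfl⟩ : ∃ N : Nat, n = (N : Int) := ⟨n.toNat, by omega⟩
  have hN : 1 ≤ N := by exact_mod_cast hn
  have hn0 : ((N : Int)) ≠ 0 := by exact_mod_cast (by omega : (N : Nat) ≠ 0)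
  simp only [divide_dict, divide_dict_alt]
  generalize (PySem.Dict.ofList dictionary).items = items
  have hfd : PySem.Int.floordiv ((items.length : Nat) : Int) (N : Int) = ((items.length / N : Nat) : Int) :=
    PySem.Int.floordiv_natCast _ _
  have hmd : PySem.Int.mod ((items.length : Nat) : Int) (N : Int) = ((items.length % N : Nat) : Int) :=
    PySem.Int.mod_natCast _ _
  have hdm : PySem.Int.divmod? ((items.length : Nat) : Int) (N : Int)
      = some (((items.length / N : Nat) : Int), ((items.length % N : Nat) : Int)) := by
    simp only [PySem.Int.divmod?, if_neg hn0]
    exact congrArg some (Prod.ext hfd hmd)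
  rw [hfd, hmd, hdm]
  have hTd : items.length = N * (items.length / N) + items.length % N := (Nat.div_add_mod items.length N).symm
  have hrN : items.length % N < N := Nat.mod_lt _ (by omega)
  rw [A_fold items (items.length / N) (items.length % N) N]
  have hB := B_fold items (items.length / N) (items.length % N) N hTd hrN 0 (by omega)
  simp only [pvOff, Nat.zero_mul, Nat.min_def, Nat.zero_le, if_pos, List.drop_zero,
    Nat.cast_zero, Nat.not_lt_zero, if_false, Nat.le_zero] at hB
  simp only [Nat.add_zero, Nat.cast_zero, Nat.zero_add, List.drop_zero] at hB
  have hinit : List.map (fun _ => (PySem.Dict.empty : PySem.Dict String String)) (List.range N)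
      = List.replicate N PySem.Dict.empty := by
    simp
  rw [hinit] at hB
  dsimp only
  simp only [Int.toNat_natCast]
  rw [hB, List.map_map]
  refine Prod.ext rfl ?_
  dsimp only
  rw [show ((N : Int) - ((items.length % N : Nat) : Int)).toNat = N - items.length % N by omega]
  exact sizes_eq (items.length / N) (items.length % N) N (le_of_lt hrN)

-- ===== VERDICT (by name: the statement is the Claim_ definition above) =====
theorem divide_dict_spec : Claim_equal_divide_dict := by
  intro dictionary n _hD hn
  unfold Pre_divide_dict at hn
  unfold Spec_divide_dict
  exact divide_dict_eq_alt dictionary n hn
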